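-- pv_equiv track=rewrite | github.com/VBrochard/ProjetL2-S4 | server.py | vainqueurs
-- ===== SOURCE A (Python) =====
-- def toutIndex(lst,cible):
--     #Renvoie tous les indices de la cible dans la liste
--     res = []
--     for i in range(len(lst)):
--         if lst[i] == cible:
--             res.append(i)
--     return res
--
-- def vainqueurs(listeProposition,objectif):
--     lstVainqueurs = []
--     lstScores = []
--     score = 0
--     score = 7
--     for i in range(len(listeProposition)):
--         if listeProposition[i][1] == objectif:
--             lstVainqueurs.append(listeProposition[i])
--             score = 10
--         else:
--             lstScores.append(abs(objectif - listeProposition[i][1]))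
--     if lstVainqueurs != []:
--         return lstVainqueurs,score
--
--     for elt in toutIndex(lstScores,min(lstScores)):
--         lstVainqueurs.append(listeProposition[elt])
--
--     return lstVainqueurs,score
-- ===== SOURCE B (Python) =====
-- def vainqueurs(listeProposition, objectif):
--     # one pass: keep the running minimal distance and the propositions that reach it;
--     # an exact match is just distance 0, so the score is 10 iff the final minimum is 0
--     best = None
--     lst = []
--     for p in listeProposition:
--         d = abs(objectif - p[1])
--         if best is None or d < best:
--             best, lst = d, [p]
--         elif d == best:
--             lst.append(p)
--     return lst, (10 if best == 0 else 7)
-- ===== Notes on version B (the rewrite author's own statement) =====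
-- stated objective: alternative
-- what changed: B is a single online pass keeping the running minimal distance and the propositions achieving it (exact match = distance 0 decides the score), instead of A's staged passes that collect winners and a distance list, take min, find its indices with toutIndex and map them back.
import Mathlib
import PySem

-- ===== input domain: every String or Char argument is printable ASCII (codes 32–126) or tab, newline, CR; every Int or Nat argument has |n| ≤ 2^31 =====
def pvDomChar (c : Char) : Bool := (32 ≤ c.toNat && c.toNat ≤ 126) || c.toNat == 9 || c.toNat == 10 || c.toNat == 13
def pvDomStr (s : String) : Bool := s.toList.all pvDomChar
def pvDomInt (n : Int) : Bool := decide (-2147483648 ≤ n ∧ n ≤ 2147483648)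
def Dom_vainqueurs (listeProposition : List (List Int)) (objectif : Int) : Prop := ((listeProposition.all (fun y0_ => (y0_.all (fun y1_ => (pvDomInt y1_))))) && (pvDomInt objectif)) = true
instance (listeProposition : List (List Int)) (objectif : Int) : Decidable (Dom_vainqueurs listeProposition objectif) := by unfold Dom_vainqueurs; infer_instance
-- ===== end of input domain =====

-- B replaces A's staged passes (collect winners + distance list, min, toutIndex, map
-- indices back) by ONE online pass keeping the running minimal distance and the
-- propositions achieving it; objective: alternative, same O(n) cost.

-- ===== PORT A =====
-- helper toutIndex: all indices of cible in lst
def toutIndexPort (lst : List Int) (cible : Int) : List Int :=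
  (PySem.List.pyRange 0 (lst.length : Int) 1).foldl
    (fun res i => if PySem.List.pyGetD lst i 0 == cible then res ++ [i] else res) []

def vainqueurs (listeProposition : List (List Int)) (objectif : Int) : List (List Int) × Int :=
  let st :=
    (PySem.List.pyRange 0 (listeProposition.length : Int) 1).foldl
      (fun (acc : List (List Int) × List Int × Int) i =>
        let p := PySem.List.pyGetD listeProposition i []
        if PySem.List.pyGetD p 1 0 == objectif then
          (acc.1 ++ [p], acc.2.1, (10 : Int))
        else
          (acc.1, acc.2.1 ++ [|objectif - PySem.List.pyGetD p 1 0|], acc.2.2))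
      ([], [], (7 : Int))
  if st.1 ≠ [] then (st.1, st.2.2)
  else
    ((toutIndexPort st.2.1 ((PySem.List.min? st.2.1 (fun x => x)).getD 0)).foldl
        (fun acc elt => acc ++ [PySem.List.pyGetD listeProposition elt []]) [],
     st.2.2)

-- ===== PORT B =====
-- single pass; Python's local d = abs(objectif - p[1]) is inlined at its use sites
def vainqueurs_alt (listeProposition : List (List Int)) (objectif : Int) : List (List Int) × Int :=
  let st := listeProposition.foldl
    (fun (st : Option Int × List (List Int)) p =>
      match st.1 with
      | none => (some |objectif - PySem.List.pyGetD p 1 0|, [p])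
      | some b =>
          if |objectif - PySem.List.pyGetD p 1 0| < b then
            (some |objectif - PySem.List.pyGetD p 1 0|, [p])
          else if |objectif - PySem.List.pyGetD p 1 0| == b then
            (st.1, st.2 ++ [p])
          else st)
    (none, [])
  (st.2, if st.1 == some (0 : Int) then (10 : Int) else 7)

-- ===== PRECONDITION & SPEC =====
-- Pre_ excludes exactly the inputs where Python A raises: the empty list (min([]) is a
-- ValueError) and any proposition of length < 2 (p[1] is an IndexError).
def Pre_vainqueurs (listeProposition : List (List Int)) (objectif : Int) : Prop :=
  listeProposition ≠ [] ∧ ∀ p ∈ listeProposition, 2 ≤ p.length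
instance (listeProposition : List (List Int)) (objectif : Int) : Decidable (Pre_vainqueurs listeProposition objectif) := by unfold Pre_vainqueurs; infer_instance
def pvWitness_vainqueurs : List (List Int) × Int := ([[0, 3], [1, 5]], 4)

def Spec_vainqueurs (listeProposition : List (List Int)) (objectif : Int) (out : List (List Int) × Int) : Prop := out = vainqueurs_alt listeProposition objectif
instance (listeProposition : List (List Int)) (objectif : Int) (out : List (List Int) × Int) : Decidable (Spec_vainqueurs listeProposition objectif out) := by unfold Spec_vainqueurs; infer_instance

-- ===== CLAIM (what is proved, stated in full; the proofs are below) =====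
def Claim_equal_vainqueurs : Prop := ∀ (listeProposition : List (List Int)) (objectif : Int), Dom_vainqueurs listeProposition objectif → Pre_vainqueurs listeProposition objectif → Spec_vainqueurs listeProposition objectif (vainqueurs listeProposition objectif)

-- ===== LEMMAS AND PROOFS =====

-- characterisation of A's accumulation loop
lemma foldA_char (objectif : Int) (L : List (List Int)) :
    ∀ (w : List (List Int)) (s : List Int) (sc : Int),
    L.foldl
      (fun (acc : List (List Int) × List Int × Int) p =>
        if PySem.List.pyGetD p 1 0 == objectif then
          (acc.1 ++ [p], acc.2.1, (10 : Int))
        else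
          (acc.1, acc.2.1 ++ [|objectif - PySem.List.pyGetD p 1 0|], acc.2.2))
      (w, s, sc)
    = (w ++ L.filter (fun p => PySem.List.pyGetD p 1 0 == objectif),
       s ++ (L.filter (fun p => !(PySem.List.pyGetD p 1 0 == objectif))).map
              (fun p => |objectif - PySem.List.pyGetD p 1 0|),
       if L.filter (fun p => PySem.List.pyGetD p 1 0 == objectif) = [] then sc else 10) := by
  induction L with
  | nil => intro w s sc; simp
  | cons a t ih =>
    intro w s sc
    by_cases h : PySem.List.pyGetD a 1 0 == objectif
    · simp only [List.foldl_cons]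
      rw [if_pos h, ih]
      simp [h]
    · simp only [List.foldl_cons]
      rw [if_neg (by simp [h]), ih]
      simp [h]

-- mapping indices of the minimal distance back through L is a direct filter of L
lemma range_filter_map {α : Type} (q : α → Bool) (d : α) (L : List α) :
    (((List.range L.length).filter (fun k => q (L.getD k d))).map
        (fun k => L.getD k d)) = L.filter q := by
  induction L using List.reverseRecOn with
  | nil => simp
  | append_singleton t a ih =>
    have hlen : (t ++ [a]).length = t.length + 1 := by simp
    have hgetlt : ∀ k ∈ List.range t.length, (t ++ [a]).getD k d = t.getD k d := by
      intro k hk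
      rw [List.mem_range] at hk
      rw [List.getD_eq_getElem?_getD, List.getD_eq_getElem?_getD,
        List.getElem?_append_left hk]
    rw [hlen, List.range_succ, List.filter_append,
      List.filter_congr (fun k hk => by rw [hgetlt k hk]), List.map_append,
      List.map_congr_left (fun k hk => hgetlt k (List.mem_of_mem_filter hk)), ih,
      List.filter_append]
    by_cases hq : q a
    · simp [hq]
    · simp [hq]

lemma tout_map (objectif m : Int) (L : List (List Int)) :
    (toutIndexPort (L.map (fun p => |objectif - PySem.List.pyGetD p 1 0|)) m).foldl
        (fun acc elt => acc ++ [PySem.List.pyGetD L elt []]) []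
    = L.filter (fun p => |objectif - PySem.List.pyGetD p 1 0| == m) := by
  rw [toutIndexPort, PySem.List.foldl_append_if_eq_filter, PySem.List.foldl_append_singleton_eq_map]
  simp only [List.nil_append, PySem.List.pyRange_one, List.length_map]
  simp only [Int.sub_zero, Int.toNat_natCast, zero_add]
  rw [List.filter_map, List.map_map]
  have h1 : ∀ k ∈ List.range L.length,
      ((fun i => PySem.List.pyGetD (L.map (fun p => |objectif - PySem.List.pyGetD p 1 0|)) i 0 == m) ∘
        (fun k : Nat => (k : Int))) k
      = (fun k => (|objectif - PySem.List.pyGetD (L.getD k []) 1 0| == m)) k := by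
    intro k hk
    rw [List.mem_range] at hk
    simp only [Function.comp, PySem.List.pyGetD_natCast]
    rw [List.getD_eq_getElem?_getD, List.getD_eq_getElem?_getD,
      List.getElem?_map, List.getElem?_eq_getElem hk]
    simp
  rw [List.filter_congr h1]
  have h2 : ∀ k ∈ (List.range L.length).filter
      (fun k => (|objectif - PySem.List.pyGetD (L.getD k []) 1 0| == m)),
      ((fun elt => PySem.List.pyGetD L elt []) ∘ (fun k : Nat => (k : Int))) k
        = (fun k => L.getD k []) k := by
    intro k hk
    simp [Function.comp, PySem.List.pyGetD_natCast]
  rw [List.map_congr_left h2]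
  exact range_filter_map (fun p => |objectif - PySem.List.pyGetD p 1 0| == m) [] L

lemma filter_neg_eq_self {α : Type} (p : α → Bool) (L : List α)
    (h : L.filter p = []) : L.filter (fun x => !(p x)) = L := by
  rw [List.filter_eq_nil_iff] at h
  apply List.filter_eq_self.mpr
  intro x hx
  simp [h x hx]

-- the running minimum never exceeds its seed
lemma foldl_min_le {α : Type} (g : α → Int) (t : List α) :
    ∀ b : Int, t.foldl (fun x q => min x (g q)) b ≤ b := by
  induction t with
  | nil => intro b; simp
  | cons q t ih =>
    intro b
    calc (q :: t).foldl (fun x r => min x (g r)) b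
        = t.foldl (fun x r => min x (g r)) (min b (g q)) := by simp
      _ ≤ min b (g q) := ih _
      _ ≤ b := min_le_left _ _

-- characterisation of B's online pass: running minimum + its achievers
lemma foldB_char (objectif : Int) (t : List (List Int)) :
    ∀ (b : Int) (acc : List (List Int)),
    t.foldl
      (fun (st : Option Int × List (List Int)) p =>
        match st.1 with
        | none => (some |objectif - PySem.List.pyGetD p 1 0|, [p])
        | some bb =>
            if |objectif - PySem.List.pyGetD p 1 0| < bb then
              (some |objectif - PySem.List.pyGetD p 1 0|, [p])
            else if |objectif - PySem.List.pyGetD p 1 0| == bb then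
              (st.1, st.2 ++ [p])
            else st)
      (some b, acc)
    = (some (t.foldl (fun x p => min x |objectif - PySem.List.pyGetD p 1 0|) b),
       (if b ≤ t.foldl (fun x p => min x |objectif - PySem.List.pyGetD p 1 0|) b then acc else []) ++
         t.filter (fun p => |objectif - PySem.List.pyGetD p 1 0| ==
           t.foldl (fun x p => min x |objectif - PySem.List.pyGetD p 1 0|) b)) := by
  induction t with
  | nil => intro b acc; simp
  | cons q t ih =>
    intro b acc
    simp only [List.foldl_cons, List.filter_cons]
    by_cases h1 : |objectif - PySem.List.pyGetD q 1 0| < b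
    · rw [if_pos h1, ih]
      have hminb : min b |objectif - PySem.List.pyGetD q 1 0| = |objectif - PySem.List.pyGetD q 1 0| :=
        min_eq_right (le_of_lt h1)
      simp only [hminb]
      have hle := foldl_min_le (fun p => |objectif - PySem.List.pyGetD p 1 0|) t
        |objectif - PySem.List.pyGetD q 1 0|
      have hb : ¬ b ≤ t.foldl (fun x p => min x |objectif - PySem.List.pyGetD p 1 0|)
          |objectif - PySem.List.pyGetD q 1 0| := by omega
      rw [if_neg hb]
      by_cases hd : |objectif - PySem.List.pyGetD q 1 0|
          = t.foldl (fun x p => min x |objectif - PySem.List.pyGetD p 1 0|)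
            |objectif - PySem.List.pyGetD q 1 0|
      · simp only [← hd]
        simp
      · have : ¬ |objectif - PySem.List.pyGetD q 1 0|
            ≤ t.foldl (fun x p => min x |objectif - PySem.List.pyGetD p 1 0|)
              |objectif - PySem.List.pyGetD q 1 0| := by omega
        simp only [if_neg this, beq_iff_eq, if_neg hd, List.nil_append]
    · rw [if_neg h1]
      have hminb : min b |objectif - PySem.List.pyGetD q 1 0| = b := min_eq_left (by omega)
      by_cases h2 : |objectif - PySem.List.pyGetD q 1 0| = b
      · rw [if_pos (beq_iff_eq.mpr h2), ih]; simp only [hminb]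
        have hle := foldl_min_le (fun p => |objectif - PySem.List.pyGetD p 1 0|) t b
        by_cases hb : b ≤ t.foldl (fun x p => min x |objectif - PySem.List.pyGetD p 1 0|) b
        · have hbe : t.foldl (fun x p => min x |objectif - PySem.List.pyGetD p 1 0|) b = b := by omega
          simp [hbe, h2]
        · have hne : ¬ |objectif - PySem.List.pyGetD q 1 0|
              = t.foldl (fun x p => min x |objectif - PySem.List.pyGetD p 1 0|) b := by omega
          simp only [if_neg hb, beq_iff_eq, if_neg hne, List.nil_append]
      · rw [if_neg (by simpa using h2), ih]; simp only [hminb]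
        have hle := foldl_min_le (fun p => |objectif - PySem.List.pyGetD p 1 0|) t b
        have hne : ¬ |objectif - PySem.List.pyGetD q 1 0|
            = t.foldl (fun x p => min x |objectif - PySem.List.pyGetD p 1 0|) b := by omega
        simp only [beq_iff_eq, if_neg hne]

-- ===== VERDICT (by name: the statement is the Claim_ definition above) =====
theorem vainqueurs_spec : Claim_equal_vainqueurs := by
  intro L objectif _ hpre
  obtain ⟨hne, -⟩ := hpre
  unfold Spec_vainqueurs vainqueurs vainqueurs_alt
  cases L with
  | nil => exact absurd rfl hne
  | cons p t =>
    rw [PySem.List.foldl_pyRange_zero_pyGetD' (p :: t) []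
      (fun (acc : List (List Int) × List Int × Int) p =>
          if PySem.List.pyGetD p 1 0 == objectif then
            (acc.1 ++ [p], acc.2.1, (10 : Int))
          else
            (acc.1, acc.2.1 ++ [|objectif - PySem.List.pyGetD p 1 0|], acc.2.2))
      ([], [], (7 : Int))]
    rw [foldA_char]
    simp only [List.foldl_cons, List.nil_append]
    simp only [foldB_char]
    have hminq : PySem.List.min? ((p :: t).map (fun q => |objectif - PySem.List.pyGetD q 1 0|)) (fun x => x)
        = some (t.foldl (fun x q => min x |objectif - PySem.List.pyGetD q 1 0|)
            |objectif - PySem.List.pyGetD p 1 0|) := by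
      rw [List.map_cons, PySem.List.min?_id_cons, List.foldl_map]
    set mm := t.foldl (fun x q => min x |objectif - PySem.List.pyGetD q 1 0|)
        |objectif - PySem.List.pyGetD p 1 0| with hmm
    have hmm_mem : mm ∈ (p :: t).map (fun q => |objectif - PySem.List.pyGetD q 1 0|) :=
      PySem.List.min?_mem hminq
    have hmm_nonneg : 0 ≤ mm := by
      obtain ⟨q, _, hqe⟩ := List.mem_map.mp hmm_mem
      rw [← hqe]; exact abs_nonneg _
    have hmm_le : ∀ q ∈ p :: t, mm ≤ |objectif - PySem.List.pyGetD q 1 0| := by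
      intro q hq
      exact PySem.List.min?_isMin hminq _ (List.mem_map_of_mem hq)
    -- B's accumulated list is the direct filter of the whole list by distance mm
    have hblist : (if |objectif - PySem.List.pyGetD p 1 0| ≤ mm then [p] else []) ++
        t.filter (fun q => |objectif - PySem.List.pyGetD q 1 0| == mm)
        = (p :: t).filter (fun q => |objectif - PySem.List.pyGetD q 1 0| == mm) := by
      have hle : mm ≤ |objectif - PySem.List.pyGetD p 1 0| := hmm_le p (List.mem_cons_self)
      rw [List.filter_cons]
      by_cases hd : |objectif - PySem.List.pyGetD p 1 0| = mm
      · simp [hd]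
      · have h1 : ¬ |objectif - PySem.List.pyGetD p 1 0| ≤ mm := by omega
        simp only [if_neg h1, beq_iff_eq, if_neg hd, List.nil_append]
    by_cases hW : (p :: t).filter (fun q => PySem.List.pyGetD q 1 0 == objectif) = []
    · -- no exact match: A maps the min-distance indices back; both give the distance filter, score 7
      have hmmne : mm ≠ 0 := by
        intro h0
        obtain ⟨q, hq, hqe⟩ := List.mem_map.mp hmm_mem
        have : PySem.List.pyGetD q 1 0 = objectif := by
          have := hqe.trans h0
          have := abs_eq_zero.mp this
          omega
        have : q ∈ (p :: t).filter (fun q => PySem.List.pyGetD q 1 0 == objectif) :=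
          List.mem_filter.mpr ⟨hq, beq_iff_eq.mpr this⟩
        rw [hW] at this
        exact absurd this (List.not_mem_nil)
      rw [filter_neg_eq_self _ _ hW]
      simp only [hW, ne_eq, not_true_eq_false, if_false, if_pos]
      rw [hminq]
      simp only [Option.getD_some, tout_map, hblist]
      have : (some mm == some (0 : Int)) = false := by
        simp [hmmne]
      rw [this]
      simp
    · -- some exact match: mm = 0 and the distance-0 filter IS the winners list, score 10
      obtain ⟨q, hqmem⟩ := List.exists_mem_of_ne_nil _ hW
      obtain ⟨hqL, hqw⟩ := List.mem_filter.mp hqmem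
      have hq0 : |objectif - PySem.List.pyGetD q 1 0| = 0 := by
        have := beq_iff_eq.mp hqw
        simp [this]
      have hmm0 : mm = 0 := le_antisymm (by have := hmm_le q hqL; omega) hmm_nonneg
      have hfilt : (p :: t).filter (fun q => |objectif - PySem.List.pyGetD q 1 0| == mm)
          = (p :: t).filter (fun q => PySem.List.pyGetD q 1 0 == objectif) := by
        apply List.filter_congr
        intro x _
        by_cases hx : PySem.List.pyGetD x 1 0 = objectif
        · simp [hx, hmm0]
        · have h1 : (PySem.List.pyGetD x 1 0 == objectif) = false := by simp [hx]
          have h2 : (|objectif - PySem.List.pyGetD x 1 0| == (0 : Int)) = false := by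
            simp only [beq_eq_false_iff_ne, ne_eq, abs_eq_zero, sub_eq_zero]
            omega
          rw [hmm0, h1, h2]
      rw [hblist, hfilt]
      simp [hW, hmm0]
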